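-- pv_equiv track=rewrite | github.com/Zhanwei-Z/GeoCAD | finetune.py | extract_loop_contents
-- ===== SOURCE A (Python) =====
-- def extract_loop_contents(s):
--     elements = s.split()
--     loop_end_indices = [i for i, elem in enumerate(elements) if elem == '<loop_end>']
--     results = []
--
--     for i in loop_end_indices:
--         j = i - 1
--         start = -1
--         while j >= 0:
--             elem = elements[j]
--             if elem.startswith('<') and elem.endswith('>'):
--                 if elem == '<curve_end>':
--                     j -= 1
--                 else:
--                     start = j
--                     break
--             else:
--                 j -= 1
--         if start != -1:
--             content = elements[start + 1:i]
--         else: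
--             content = elements[:i]
--         results.append(' '.join(content)+' <loop_end>')
--     return results
-- ===== SOURCE B (Python) =====
-- def extract_loop_contents(s):
--     elements = s.split()
--     results = []
--     last_boundary = -1
--     for i, tok in enumerate(elements):
--         if tok.startswith('<') and tok.endswith('>') and tok != '<curve_end>':
--             if tok == '<loop_end>':
--                 results.append(' '.join(elements[last_boundary + 1:i]) + ' <loop_end>')
--             last_boundary = i
--     return results
-- ===== Notes on version B (the rewrite author's own statement) =====
-- stated objective: alternative
-- what changed: Replaced the per-'<loop_end>' backward while-scan for the previous boundary tag with a single forward pass that maintains the index of the most recent non-'<curve_end>' tag token.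
import Mathlib
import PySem

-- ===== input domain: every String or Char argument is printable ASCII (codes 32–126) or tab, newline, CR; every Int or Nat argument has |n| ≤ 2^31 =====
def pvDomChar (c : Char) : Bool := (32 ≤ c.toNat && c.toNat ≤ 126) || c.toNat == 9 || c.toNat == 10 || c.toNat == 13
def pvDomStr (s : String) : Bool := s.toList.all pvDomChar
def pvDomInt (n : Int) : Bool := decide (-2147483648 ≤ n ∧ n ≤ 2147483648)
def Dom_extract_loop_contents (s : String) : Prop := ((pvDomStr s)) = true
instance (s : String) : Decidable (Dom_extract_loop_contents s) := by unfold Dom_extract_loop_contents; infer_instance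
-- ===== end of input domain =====

-- B replaces A's backward while-rescan before each '<loop_end>' with a single forward pass that
-- carries the index of the last boundary tag (objective: alternative — one pass instead of nested rescans).

-- ===== PORT A =====
-- A's inner while loop: scan backwards from j for the nearest tag token that is not '<curve_end>'.
def pvScanA (elements : List String) (j : Int) : Int :=
  if h : 0 ≤ j then
    let elem := PySem.List.pyGetD elements j ""
    if PySem.Str.startswith elem "<" && PySem.Str.endswith elem ">" then
      if elem = "<curve_end>" then pvScanA elements (j - 1) else j
    else pvScanA elements (j - 1)
  else -1
termination_by (j + 1).toNat
decreasing_by all_goals (simp; omega)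

def extract_loop_contents (s : String) : List String :=
  let elements := PySem.Str.split₀ s
  let loop_end_indices := (PySem.List.enumerate elements 0).filterMap
    (fun p => if p.2 = "<loop_end>" then some p.1 else none)
  loop_end_indices.foldl (fun results i =>
    let start := pvScanA elements (i - 1)
    let content := if start ≠ -1 then PySem.List.slice elements (some (start + 1)) (some i)
                   else PySem.List.slice elements none (some i)
    results ++ [PySem.Str.join " " content ++ " <loop_end>"]) []

-- ===== PORT B =====
def extract_loop_contents_alt (s : String) : List String :=
  let elements := PySem.Str.split₀ s
  ((PySem.List.enumerate elements 0).foldl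
    (fun (st : Int × List String) p =>
      if PySem.Str.startswith p.2 "<" && PySem.Str.endswith p.2 ">" && p.2 ≠ "<curve_end>" then
        (p.1,
          if p.2 = "<loop_end>" then
            st.2 ++ [PySem.Str.join " " (PySem.List.slice elements (some (st.1 + 1)) (some p.1)) ++ " <loop_end>"]
          else st.2)
      else st)
    (-1, [])).2

-- ===== PRECONDITION & SPEC =====
def Spec_extract_loop_contents (s : String) (out : List String) : Prop := out = extract_loop_contents_alt s
instance (s : String) (out : List String) : Decidable (Spec_extract_loop_contents s out) := by unfold Spec_extract_loop_contents; infer_instance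

-- ===== CLAIM (what is proved, stated in full; the proofs are below) =====
def Claim_equal_extract_loop_contents : Prop := ∀ (s : String), Dom_extract_loop_contents s → Spec_extract_loop_contents s (extract_loop_contents s)

-- ===== LEMMAS AND PROOFS =====

theorem pvScanA_neg (elements : List String) (j : Int) (h : j < 0) :
    pvScanA elements j = -1 := by
  unfold pvScanA; simp [not_le.mpr h]

-- one-step unfolding of A's backward scan at an in-range index n whose element is y
theorem pvScanA_step (elements : List String) (n : Nat) (y : String)
    (hdrop : elements.drop n = y :: (elements.drop (n + 1))) :
    pvScanA elements (n : Int) =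
      if PySem.Str.startswith y "<" && PySem.Str.endswith y ">" && y ≠ "<curve_end>" then (n : Int)
      else pvScanA elements ((n : Int) - 1) := by
  have hy : elements[n]? = some y := by
    have := congrArg (fun l => l.head?) hdrop
    simpa [List.head?_drop] using this
  rw [pvScanA]
  simp [PySem.List.pyGetD_natCast, List.getD_eq_getElem?_getD, hy]
  split_ifs <;> simp_all

-- invariant of B's forward pass: starting at index n with last_boundary = pvScanA elements (n-1)
-- (A's backward scan from n-1), the fold appends exactly A's content for each '<loop_end>' in the suffix
theorem pvBfold (elements : List String) (ys : List String) :
  ∀ (n : Nat) (res : List String),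
    elements.drop n = ys →
    ((PySem.List.enumerate ys (n : Int)).foldl
      (fun (st : Int × List String) p =>
        if PySem.Str.startswith p.2 "<" && PySem.Str.endswith p.2 ">" && p.2 ≠ "<curve_end>" then
          (p.1,
            if p.2 = "<loop_end>" then
              st.2 ++ [PySem.Str.join " " (PySem.List.slice elements (some (st.1 + 1)) (some p.1)) ++ " <loop_end>"]
            else st.2)
        else st)
      (pvScanA elements ((n : Int) - 1), res)).2
    = res ++ (((PySem.List.enumerate ys (n : Int)).filterMap
        (fun p => if p.2 = "<loop_end>" then some p.1 else none)).map
        (fun i => PySem.Str.join " " (PySem.List.slice elements (some (pvScanA elements (i-1) + 1)) (some i)) ++ " <loop_end>")) := by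
  induction ys with
  | nil => intro n res _; simp [PySem.List.enumerate_nil]
  | cons y ys ih =>
    intro n res hdrop
    have hdrop' : elements.drop (n+1) = ys := by
      have h := congrArg List.tail hdrop
      rw [List.tail_drop] at h
      simpa using h
    have hstep := pvScanA_step elements n y (by rw [hdrop, hdrop'])
    rw [PySem.List.enumerate_cons]
    by_cases hc : (PySem.Str.startswith y "<" && PySem.Str.endswith y ">" && y ≠ "<curve_end>") = true
    · rw [if_pos hc] at hstep
      by_cases hle : y = "<loop_end>"
      · subst hle
        set_option maxRecDepth 4096 in
        simp only [List.foldl_cons, List.filterMap_cons, hc, if_true, List.map_cons]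
        have IH := ih (n+1) (res ++ [PySem.Str.join " " (PySem.List.slice elements (some (pvScanA elements ((n:Int) - 1) + 1)) (some (n:Int))) ++ " <loop_end>"]) hdrop'
        rw [show ((n+1 : Nat) : Int) = (n : Int) + 1 by push_cast; ring] at IH
        rw [show (n:Int) + 1 - 1 = (n:Int) by ring, hstep] at IH
        rw [IH]
        simp
      · set_option maxRecDepth 4096 in
        simp only [List.foldl_cons, List.filterMap_cons, hc, if_true, hle, if_false]
        have IH := ih (n+1) res hdrop'
        rw [show ((n+1 : Nat) : Int) = (n : Int) + 1 by push_cast; ring] at IH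
        rw [show (n:Int) + 1 - 1 = (n:Int) by ring, hstep] at IH
        rw [IH]
    · rw [if_neg hc] at hstep
      have hle : y ≠ "<loop_end>" := by
        intro h; subst h; exact hc (by decide)
      simp only [List.foldl_cons, List.filterMap_cons, hc, if_neg hle, Bool.not_eq_true] at *
      rw [if_neg (by simp [hc])]
      have IH := ih (n+1) res hdrop'
      rw [show ((n+1 : Nat) : Int) = (n : Int) + 1 by push_cast; ring] at IH
      rw [show (n:Int) + 1 - 1 = (n:Int) by ring, hstep] at IH
      rw [IH]

theorem pv_main (s : String) : extract_loop_contents s = extract_loop_contents_alt s := by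
  simp only [extract_loop_contents, extract_loop_contents_alt]
  set elements := PySem.Str.split₀ s with helems
  -- B side by the fold invariant
  have hB := pvBfold elements elements 0 [] (by simp)
  rw [show ((0:Nat):Int) = (0:Int) by norm_num] at hB
  rw [show (0:Int) - 1 = -1 by ring, pvScanA_neg elements (-1) (by norm_num)] at hB
  rw [hB]
  -- A side: fold of appends is a map
  rw [PySem.List.foldl_append_singleton_eq_map]
  simp only [List.nil_append]
  -- pointwise: the two slice expressions agree for 0 ≤ i
  apply List.map_congr_left
  intro i hi
  have hpos : 0 ≤ i := by
    have h1 : i ∈ (PySem.List.enumerate elements 0).map (·.1) := by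
      rcases List.mem_filterMap.mp hi with ⟨p, hp, hpi⟩
      have : p.1 = i := by
        by_cases h : p.2 = "<loop_end>" <;> simp [h] at hpi
        exact hpi
      exact this ▸ List.mem_map_of_mem hp
    rw [PySem.List.map_fst_enumerate] at h1
    exact (PySem.List.mem_pyRange_one.mp h1).1
  by_cases hstart : pvScanA elements (i - 1) ≠ -1
  · simp [hstart]
  · rw [not_ne_iff] at hstart
    rw [hstart]
    rw [if_neg (by simp)]
    rw [show (-1 : Int) + 1 = 0 by ring]
    rw [PySem.List.slice_to _ hpos, PySem.List.slice_toNat _ le_rfl hpos]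
    simp

-- ===== VERDICT (by name: the statement is the Claim_ definition above) =====
theorem extract_loop_contents_spec : Claim_equal_extract_loop_contents := by
  intro s _
  unfold Spec_extract_loop_contents
  exact pv_main s
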